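-- pv_equiv track=rewrite | github.com/jakehoward/advent-of-code | 2024/python/days/day_14.py | find_wedges_population
-- ===== SOURCE A (Python) =====
-- def find_wedges_population(robots, x_size):
--     positions = set([pos for pos, _ in robots])
--     top_size = (x_size - (x_size // 4)) // 2
--     x_step = 1
--     height = top_size
--     num_robots = 0
--     for y in range(height):
--         left_xys = [(x, y) for x in range(top_size - y * x_step)]
--         right_end = x_size
--         right_start = right_end - top_size - y * x_step
--         right_xys = [(x, y) for x in range(right_start, right_end, 1)]
--         num_robots += sum([1 for p in left_xys + right_xys if p in positions])
--     return num_robots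
-- ===== SOURCE B (Python) =====
-- def find_wedges_population(robots, x_size):
--     top = (x_size - x_size // 4) // 2
--     positions = set(pos for pos, _ in robots)
--     count = 0
--     for (x, y) in positions:
--         if 0 <= y < top and (0 <= x < top - y or x_size - top - y <= x < x_size):
--             count += 1
--     return count
-- ===== Notes on version B (the rewrite author's own statement) =====
-- stated objective: faster
-- what changed: Instead of enumerating every cell of both wedge rows and probing the position set (O(x_size^2) cells), B iterates the distinct robot positions once and tests the wedge-membership inequalities directly, O(n) in the number of robots.
import Mathlib
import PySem

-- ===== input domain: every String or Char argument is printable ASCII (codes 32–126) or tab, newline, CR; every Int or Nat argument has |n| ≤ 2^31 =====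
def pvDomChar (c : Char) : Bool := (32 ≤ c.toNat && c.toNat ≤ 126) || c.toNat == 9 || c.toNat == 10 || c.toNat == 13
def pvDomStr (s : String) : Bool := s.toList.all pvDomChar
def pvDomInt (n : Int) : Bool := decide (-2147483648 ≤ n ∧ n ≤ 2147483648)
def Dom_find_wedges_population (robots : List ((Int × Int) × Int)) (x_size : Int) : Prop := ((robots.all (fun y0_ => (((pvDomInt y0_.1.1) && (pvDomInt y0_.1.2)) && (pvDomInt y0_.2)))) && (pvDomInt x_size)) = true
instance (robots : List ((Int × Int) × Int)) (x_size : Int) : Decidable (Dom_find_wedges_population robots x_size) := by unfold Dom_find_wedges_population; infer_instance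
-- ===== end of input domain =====

-- B iterates the distinct robot positions once and tests wedge membership arithmetically,
-- instead of A's enumeration of every cell of the two wedges; same return value everywhere.

-- ===== PORT A =====
def find_wedges_population (robots : List ((Int × Int) × Int)) (x_size : Int) : Int :=
  let positions : PySem.Set (Int × Int) := PySem.Set.ofList (robots.map (fun r => r.1))
  let top_size := PySem.Int.floordiv (x_size - PySem.Int.floordiv x_size 4) 2
  let x_step : Int := 1
  let height := top_size
  (PySem.List.pyRange 0 height 1).foldl (fun num_robots y =>
    let left_xys := (PySem.List.pyRange 0 (top_size - y * x_step) 1).map (fun x => (x, y))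
    let right_end := x_size
    let right_start := right_end - top_size - y * x_step
    let right_xys := (PySem.List.pyRange right_start right_end 1).map (fun x => (x, y))
    num_robots + (((left_xys ++ right_xys).filter (fun p => PySem.Set.contains positions p)).map
      (fun _ => (1 : Int))).sum) 0

-- ===== PORT B =====
def find_wedges_population_alt (robots : List ((Int × Int) × Int)) (x_size : Int) : Int :=
  let top := PySem.Int.floordiv (x_size - PySem.Int.floordiv x_size 4) 2
  let positions : PySem.Set (Int × Int) := PySem.Set.ofList (robots.map (fun r => r.1))
  positions.foldl (fun count p =>
    if 0 ≤ p.2 ∧ p.2 < top ∧ (0 ≤ p.1 ∧ p.1 < top - p.2 ∨ x_size - top - p.2 ≤ p.1 ∧ p.1 < x_size)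
    then count + 1 else count) 0

-- ===== PRECONDITION & SPEC =====
def Spec_find_wedges_population (robots : List ((Int × Int) × Int)) (x_size : Int) (out : Int) : Prop := out = find_wedges_population_alt robots x_size
instance (robots : List ((Int × Int) × Int)) (x_size : Int) (out : Int) : Decidable (Spec_find_wedges_population robots x_size out) := by unfold Spec_find_wedges_population; infer_instance

-- ===== CLAIM (what is proved, stated in full; the proofs are below) =====
def Claim_equal_find_wedges_population : Prop := ∀ (robots : List ((Int × Int) × Int)) (x_size : Int), Dom_find_wedges_population robots x_size → Spec_find_wedges_population robots x_size (find_wedges_population robots x_size)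

-- ===== LEMMAS AND PROOFS =====

-- symmetric counting: for two duplicate-free lists, counting elements of one that lie in the
-- other is symmetric
theorem pv_count_symm {α : Type} [BEq α] [LawfulBEq α] (l1 l2 : List α)
    (h1 : l1.Nodup) (h2 : l2.Nodup) :
    l1.countP (fun a => decide (a ∈ l2)) = l2.countP (fun a => decide (a ∈ l1)) := by
  letI : DecidableEq α := fun a b => decidable_of_iff ((a == b) = true) beq_iff_eq
  rw [List.countP_eq_length_filter, List.countP_eq_length_filter,
      ← List.toFinset_card_of_nodup (h1.filter _),
      ← List.toFinset_card_of_nodup (h2.filter _),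
      List.toFinset_filter, List.toFinset_filter]
  simp only [decide_eq_true_eq, ← List.mem_toFinset]
  rw [Finset.filter_mem_eq_inter, Finset.filter_mem_eq_inter, Finset.inter_comm]

-- the cells of row y of A's two wedges
def pvCells (x_size T y : Int) : List (Int × Int) :=
  (PySem.List.pyRange 0 (T - y) 1).map (fun x => (x, y)) ++
  (PySem.List.pyRange (x_size - T - y) x_size 1).map (fun x => (x, y))

theorem pv_mem_cells (x_size T y : Int) (p : Int × Int) :
    p ∈ pvCells x_size T y ↔
      p.2 = y ∧ (0 ≤ p.1 ∧ p.1 < T - y ∨ x_size - T - y ≤ p.1 ∧ p.1 < x_size) := by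
  obtain ⟨px, py⟩ := p
  simp [pvCells, PySem.List.mem_pyRange_one, Prod.ext_iff]
  tauto

theorem pv_nodup_cells (x_size T y : Int) (h : 2 * T ≤ x_size) :
    (pvCells x_size T y).Nodup := by
  have hinj : Function.Injective (fun x : Int => (x, y)) := by
    intro a b hab; simpa using hab
  have n1 := PySem.List.nodup_pyRange_one 0 (T - y)
  have n2 := PySem.List.nodup_pyRange_one (x_size - T - y) x_size
  refine List.Nodup.append (n1.map hinj) (n2.map hinj) ?_
  intro a ha hb
  simp only [List.mem_map, PySem.List.mem_pyRange_one] at ha hb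
  obtain ⟨x1, hx1, rfl⟩ := ha
  obtain ⟨x2, hx2, hx12⟩ := hb
  have : x2 = x1 := by simpa [Prod.ext_iff] using hx12
  omega

-- sum of an equality indicator over a duplicate-free list is a membership indicator
theorem pv_ind_sum (c : Int) (S : List Int) (hS : S.Nodup) :
    (S.map (fun y => if y = c then (1 : Int) else 0)).sum = if c ∈ S then 1 else 0 := by
  induction S with
  | nil => simp
  | cons a t ih =>
    simp only [List.nodup_cons] at hS
    rw [List.map_cons, List.sum_cons, ih hS.2]
    by_cases hac : a = c
    · subst hac; simp [hS.1]
    · have hca : ¬ c = a := fun h => hac h.symm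
      simp [hac, hca]

-- one position contributes to exactly the row it lies in
theorem pv_row_sum (x_size T : Int) (p : Int × Int) :
    ((PySem.List.pyRange 0 T 1).map (fun y => if p ∈ pvCells x_size T y then (1 : Int) else 0)).sum
    = if 0 ≤ p.2 ∧ p.2 < T ∧ (0 ≤ p.1 ∧ p.1 < T - p.2 ∨ x_size - T - p.2 ≤ p.1 ∧ p.1 < x_size)
      then 1 else 0 := by
  by_cases hC : (0 ≤ p.1 ∧ p.1 < T - p.2 ∨ x_size - T - p.2 ≤ p.1 ∧ p.1 < x_size)
  · have hcong : ∀ y ∈ PySem.List.pyRange 0 T 1,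
        (if p ∈ pvCells x_size T y then (1 : Int) else 0) = (if y = p.2 then 1 else 0) := by
      intro y _
      by_cases hy2 : y = p.2
      · subst hy2
        rw [if_pos ((pv_mem_cells x_size T p.2 p).mpr ⟨rfl, hC⟩), if_pos rfl]
      · have hne : ¬ p.2 = y := fun h => hy2 h.symm
        rw [if_neg (fun h => hne ((pv_mem_cells x_size T y p).mp h).1), if_neg hy2]
    rw [List.map_congr_left hcong, pv_ind_sum p.2 _ (PySem.List.nodup_pyRange_one 0 T)]
    simp only [PySem.List.mem_pyRange_one]
    by_cases h : 0 ≤ p.2 ∧ p.2 < T <;> simp [h] <;> omega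
  · have hcong : ∀ y ∈ PySem.List.pyRange 0 T 1,
        (if p ∈ pvCells x_size T y then (1 : Int) else 0) = 0 := by
      intro y _
      rw [if_neg]
      rw [pv_mem_cells]
      rintro ⟨h2, h3⟩
      exact hC (by rw [h2]; exact h3)
    rw [List.map_congr_left hcong, if_neg (fun h => hC h.2.2)]
    simp

-- exchanging the two summations: row-by-row counting equals position-by-position counting
theorem pv_exchange (x_size T : Int) (l : List (Int × Int)) :
    ((PySem.List.pyRange 0 T 1).map
        (fun y => (l.countP (fun p => decide (p ∈ pvCells x_size T y)) : Int))).sum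
    = (l.countP (fun p => decide (0 ≤ p.2 ∧ p.2 < T ∧
        (0 ≤ p.1 ∧ p.1 < T - p.2 ∨ x_size - T - p.2 ≤ p.1 ∧ p.1 < x_size))) : Int) := by
  induction l with
  | nil => simp
  | cons a t ih =>
    have hsplit : ∀ y : Int,
        ((List.countP (fun p => decide (p ∈ pvCells x_size T y)) (a :: t) : Int))
        = (List.countP (fun p => decide (p ∈ pvCells x_size T y)) t : Int)
          + (if a ∈ pvCells x_size T y then (1 : Int) else 0) := by
      intro y
      rw [List.countP_cons]
      by_cases ha : a ∈ pvCells x_size T y <;> simp [ha]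
    rw [List.map_congr_left (fun y _ => hsplit y)]
    rw [PySem.List.sum_map_add_int]
    rw [ih, pv_row_sum]
    rw [List.countP_cons]
    by_cases ha : (0 ≤ a.2 ∧ a.2 < T ∧
        (0 ≤ a.1 ∧ a.1 < T - a.2 ∨ x_size - T - a.2 ≤ a.1 ∧ a.1 < x_size)) <;> simp [ha]

-- ===== VERDICT (by name: the statement is the Claim_ definition above) =====
theorem find_wedges_population_spec : Claim_equal_find_wedges_population := by
  intro robots x_size _
  unfold Spec_find_wedges_population
  set P : PySem.Set (Int × Int) := PySem.Set.ofList (robots.map (fun r => r.1)) with hP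
  set T : Int := PySem.Int.floordiv (x_size - PySem.Int.floordiv x_size 4) 2 with hT
  have harith : 0 < T → 2 * T ≤ x_size := by
    rw [hT, PySem.Int.floordiv_eq_ediv_of_pos (by norm_num),
        PySem.Int.floordiv_eq_ediv_of_pos (by norm_num)]
    omega
  have hcont : ∀ p : Int × Int, PySem.Set.contains P p = decide (p ∈ P) := by
    intro p
    by_cases h : p ∈ P <;> simp [h]
  -- A as a sum over rows
  have hA : find_wedges_population robots x_size
      = ((PySem.List.pyRange 0 T 1).map
          (fun y => ((pvCells x_size T y).countP (fun p => decide (p ∈ P)) : Int))).sum := by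
    show (PySem.List.pyRange 0 T 1).foldl (fun num_robots y =>
        num_robots +
          (((((PySem.List.pyRange 0 (T - y * 1) 1).map (fun x => (x, y))) ++
              ((PySem.List.pyRange (x_size - T - y * 1) x_size 1).map (fun x => (x, y)))).filter
                (fun p => PySem.Set.contains P p)).map (fun _ => (1 : Int))).sum) 0 = _
    rw [PySem.List.foldl_add]
    simp only [mul_one]
    have hrow : ∀ y : Int,
        (((((PySem.List.pyRange 0 (T - y) 1).map (fun x => (x, y))) ++
            ((PySem.List.pyRange (x_size - T - y) x_size 1).map (fun x => (x, y)))).filter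
              (fun p => PySem.Set.contains P p)).map (fun _ => (1 : Int))).sum
        = ((pvCells x_size T y).countP (fun p => decide (p ∈ P)) : Int) := by
      intro y
      show (((pvCells x_size T y).filter (fun p => PySem.Set.contains P p)).map
          (fun _ => (1 : Int))).sum = _
      rw [PySem.List.sum_map_const_int]
      rw [List.countP_eq_length_filter]
      rw [List.filter_congr (fun p _ => hcont p)]
      ring
    rw [List.map_congr_left (fun y _ => hrow y), zero_add]
  -- B as a count over the distinct positions
  have hB : find_wedges_population_alt robots x_size
      = (P.countP (fun p => decide (0 ≤ p.2 ∧ p.2 < T ∧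
          (0 ≤ p.1 ∧ p.1 < T - p.2 ∨ x_size - T - p.2 ≤ p.1 ∧ p.1 < x_size))) : Int) := by
    show P.foldl (fun count p =>
        if 0 ≤ p.2 ∧ p.2 < T ∧ (0 ≤ p.1 ∧ p.1 < T - p.2 ∨ x_size - T - p.2 ≤ p.1 ∧ p.1 < x_size)
        then count + 1 else count) 0 = _
    rw [PySem.List.foldl_ite_add_one]
    ring
  rw [hA, hB]
  -- per row, flip the count by symmetry (rows are duplicate-free since the wedges are disjoint)
  have hrow : ∀ y ∈ PySem.List.pyRange 0 T 1,
      ((pvCells x_size T y).countP (fun p => decide (p ∈ P)) : Int)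
      = (P.countP (fun p => decide (p ∈ pvCells x_size T y)) : Int) := by
    intro y hy
    rw [PySem.List.mem_pyRange_one] at hy
    have h2T : 2 * T ≤ x_size := harith (by omega)
    have hPnd : P.Nodup := by rw [hP]; exact PySem.Set.nodup_ofList _
    exact_mod_cast @pv_count_symm (Int × Int) _ _ (pvCells x_size T y) P
      (pv_nodup_cells x_size T y h2T) hPnd
  rw [List.map_congr_left hrow, pv_exchange]
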